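-- pv_equiv track=rewrite | github.com/PrakharTTN/pythonBootcamp | Week_2_Class/09_Doubts/animal.py | animal_codex
-- ===== SOURCE A (Python) =====
-- def animal_codex(animal_list: list) -> dict:
--     """This function is to create unique code for each animal"""
--     starting_code = 97  # ascii value of a is 97
--     animal_dict = {}
--     for i in animal_list:
--         if i not in animal_dict:
--             animal_dict[i] = chr(starting_code)  # converts ascii value to word
--             starting_code += 1
--
--     return animal_dict
-- ===== SOURCE B (Python) =====
-- def animal_codex(animal_list: list) -> dict:
--     """Sort the distinct animals by first-occurrence index, then zip with letters."""
--     order = sorted(set(animal_list), key=animal_list.index)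
--     return dict(zip(order, map(chr, range(97, 97 + len(order)))))
-- ===== Notes on version B (the rewrite author's own statement) =====
-- stated objective: alternative
-- what changed: Replaces A's single fused pass (membership test + manual counter) with a sort-based algorithm: take set(animal_list), sort it by first-occurrence index (list.index), and zip the sorted order with the letter range; correct because first-occurrence indices of distinct elements are strictly increasing in first-appearance order.
import Mathlib
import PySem

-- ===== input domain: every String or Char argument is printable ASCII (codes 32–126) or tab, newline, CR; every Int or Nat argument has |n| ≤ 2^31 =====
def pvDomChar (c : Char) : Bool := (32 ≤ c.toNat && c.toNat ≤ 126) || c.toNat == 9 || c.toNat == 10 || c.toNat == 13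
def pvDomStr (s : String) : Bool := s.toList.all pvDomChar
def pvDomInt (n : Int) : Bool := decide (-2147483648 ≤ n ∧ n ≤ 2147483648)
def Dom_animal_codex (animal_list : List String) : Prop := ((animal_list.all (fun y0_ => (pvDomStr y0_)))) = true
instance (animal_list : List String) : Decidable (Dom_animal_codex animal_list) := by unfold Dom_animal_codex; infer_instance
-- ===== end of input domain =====

-- B replaces A's fused membership-test/counter pass by a sort-based algorithm: sort set(l) by first-occurrence index, zip with letters (alternative, same result).


-- chr(n) for the ASCII codes both programs build
def pvChr (n : Int) : String := String.ofList [Char.ofNat n.toNat]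

-- first-occurrence index animal_list.index(a); exact for a ∈ animal_list (the only calls both programs make)
def pvIdx (l : List String) (a : String) : Nat := (PySem.List.index? l a).getD 0

-- ===== PORT A =====
-- single fused pass: dict + manual counter, test membership, insert, bump counter
def animal_codex (animal_list : List String) : List (String × String) :=
  (animal_list.foldl
    (fun (st : PySem.Dict String String × Int) i =>
      if st.1.contains i then st
      else (st.1.insert i (pvChr st.2), st.2 + 1))
    (PySem.Dict.empty, 97)).1.items

-- ===== PORT B =====
-- order = sorted(set(animal_list), key=animal_list.index)  (key injective on the set: first-occurrence
-- indices of distinct elements differ, so the result does not depend on set iteration order);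
-- dict(zip(order, map(chr, range(97, 97+len(order))))): keys are distinct, so the dict IS this association list
def animal_codex_alt (animal_list : List String) : List (String × String) :=
  let order := PySem.List.sorted (PySem.Set.ofList animal_list) (fun a => pvIdx animal_list a) false
  order.zip ((PySem.List.pyRange 97 (97 + (order.length : Int)) 1).map pvChr)

-- ===== PRECONDITION & SPEC =====
def Spec_animal_codex (animal_list : List String) (out : List (String × String)) : Prop := out = animal_codex_alt animal_list
instance (animal_list : List String) (out : List (String × String)) : Decidable (Spec_animal_codex animal_list out) := by unfold Spec_animal_codex; infer_instance

-- ===== CLAIM (what is proved, stated in full; the proofs are below) =====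
def Claim_equal_animal_codex : Prop := ∀ (animal_list : List String), Dom_animal_codex animal_list → Spec_animal_codex animal_list (animal_codex animal_list)

-- ===== LEMMAS AND PROOFS =====

lemma pvIdx_cons_self (x : String) (l : List String) : pvIdx (x :: l) x = 0 := by
  unfold pvIdx; rw [PySem.List.index?_cons_self]; rfl

lemma pvIdx_cons_of_ne_mem {a x : String} {l : List String} (hne : x ≠ a) (hmem : a ∈ l) :
    pvIdx (x :: l) a = pvIdx l a + 1 := by
  obtain ⟨k, hk⟩ := Option.isSome_iff_exists.mp ((PySem.List.index?_isSome_iff l a).mpr hmem)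
  unfold pvIdx; rw [PySem.List.index?_cons_of_ne l hne, hk]; rfl

lemma filter_ofList (p : String → Bool) (l : List String) :
    List.filter p (PySem.Set.ofList l) = PySem.Set.ofList (List.filter p l) := by
  induction l with
  | nil => simp [PySem.Set.ofList_nil]
  | cons z l ih =>
      simp only [PySem.Set.ofList_cons, PySem.Set.discard, List.filter_cons]
      rw [List.filter_filter,
        show (fun a => p a && !(a == z)) = (fun a => !(a == z) && p a) by
          funext a; rw [Bool.and_comm],
        ← List.filter_filter, ih]
      by_cases hz : p z = true
      · simp [hz, PySem.Set.ofList_cons, PySem.Set.discard]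
      · simp only [hz, if_false, Bool.false_eq_true]
        apply List.filter_eq_self.mpr
        intro a ha
        have hp := List.of_mem_filter ((PySem.Set.mem_ofList _ _).mp ha)
        simp only [Bool.not_eq_true', beq_eq_false_iff_ne, ne_eq]
        rintro rfl; exact hz hp

lemma dedup_cons (x : String) (l : List String) :
    PySem.List.dedup (x :: l) = x :: PySem.List.dedup (l.filter (fun y => !(y == x))) := by
  simp only [PySem.List.dedup_eq_ofList, PySem.Set.ofList_cons, PySem.Set.discard,
    filter_ofList]

-- first-occurrence indices are order-reflecting through a filter
lemma pvIdx_filter_mono (p : String → Bool) :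
    ∀ (l : List String) (a b : String), a ∈ l.filter p → b ∈ l.filter p →
      pvIdx (l.filter p) a < pvIdx (l.filter p) b → pvIdx l a < pvIdx l b := by
  intro l
  induction l with
  | nil => intro a b ha; simp at ha
  | cons y l ih =>
      intro a b ha hb hlt
      by_cases hpy : p y = true
      · rw [List.filter_cons_of_pos hpy] at ha hb hlt
        by_cases hay : a = y
        · have h0 : pvIdx (y :: List.filter p l) a = 0 := by rw [hay, pvIdx_cons_self]
          rw [h0] at hlt
          have hby : b ≠ y := by rintro rfl; rw [pvIdx_cons_self] at hlt; omega
          have hbmem : b ∈ l.filter p := (List.mem_cons.mp hb).resolve_left hby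
          rw [hay, pvIdx_cons_self,
            pvIdx_cons_of_ne_mem (Ne.symm hby) (List.mem_of_mem_filter hbmem)]
          omega
        · have hamem : a ∈ l.filter p := (List.mem_cons.mp ha).resolve_left hay
          have hlt' : pvIdx (y :: List.filter p l) a = pvIdx (List.filter p l) a + 1 :=
            pvIdx_cons_of_ne_mem (Ne.symm hay) hamem
          have hby : b ≠ y := by
            rintro rfl
            rw [pvIdx_cons_self, hlt'] at hlt
            omega
          have hbmem : b ∈ l.filter p := (List.mem_cons.mp hb).resolve_left hby
          rw [hlt', pvIdx_cons_of_ne_mem (Ne.symm hby) hbmem] at hlt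
          rw [pvIdx_cons_of_ne_mem (Ne.symm hay) (List.mem_of_mem_filter hamem),
            pvIdx_cons_of_ne_mem (Ne.symm hby) (List.mem_of_mem_filter hbmem)]
          exact Nat.add_lt_add_right (ih a b hamem hbmem (by omega)) 1
      · rw [List.filter_cons_of_neg (by simpa using hpy)] at ha hb hlt
        have hpa := List.of_mem_filter ha
        have hpb := List.of_mem_filter hb
        have hay : a ≠ y := by rintro rfl; exact hpy hpa
        have hby : b ≠ y := by rintro rfl; exact hpy hpb
        rw [pvIdx_cons_of_ne_mem (Ne.symm hay) (List.mem_of_mem_filter ha),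
          pvIdx_cons_of_ne_mem (Ne.symm hby) (List.mem_of_mem_filter hb)]
        exact Nat.add_lt_add_right (ih a b ha hb hlt) 1

-- along set(l) (first-appearance order) the first-occurrence indices strictly increase
lemma pairwise_pvIdx_len :
    ∀ (n : Nat) (l : List String), l.length ≤ n →
      (PySem.Set.ofList l).Pairwise (fun a b => pvIdx l a < pvIdx l b) := by
  intro n
  induction n with
  | zero =>
      intro l hl
      have : l = [] := List.eq_nil_of_length_eq_zero (Nat.le_zero.mp hl)
      subst this; simp [PySem.Set.ofList_nil]
  | succ n ih =>
      intro l hl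
      cases l with
      | nil => simp [PySem.Set.ofList_nil]
      | cons x l =>
          have hded := dedup_cons x l
          simp only [PySem.List.dedup_eq_ofList] at hded
          rw [hded]
          constructor
          · intro b hb
            have hb' := (PySem.Set.mem_ofList _ _).mp hb
            have hbx : b ≠ x := by
              have := List.of_mem_filter hb'
              simpa using this
            rw [pvIdx_cons_self,
              pvIdx_cons_of_ne_mem (Ne.symm hbx) (List.mem_of_mem_filter hb')]
            omega
          · have hlen : (l.filter (fun y => !(y == x))).length ≤ n := by
              have h1 := List.length_filter_le (fun y => !(y == x)) l
              simp only [List.length_cons] at hl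
              omega
            refine List.Pairwise.imp_of_mem ?_ (ih _ hlen)
            intro a b ha hb hlt
            have ha' := (PySem.Set.mem_ofList _ _).mp ha
            have hb' := (PySem.Set.mem_ofList _ _).mp hb
            have hax : a ≠ x := by have := List.of_mem_filter ha'; simpa using this
            have hbx : b ≠ x := by have := List.of_mem_filter hb'; simpa using this
            rw [pvIdx_cons_of_ne_mem (Ne.symm hax) (List.mem_of_mem_filter ha'),
              pvIdx_cons_of_ne_mem (Ne.symm hbx) (List.mem_of_mem_filter hb')]
            exact Nat.add_lt_add_right (pvIdx_filter_mono _ l a b ha' hb' hlt) 1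

lemma pairwise_pvIdx (l : List String) :
    (PySem.Set.ofList l).Pairwise (fun a b => pvIdx l a < pvIdx l b) :=
  pairwise_pvIdx_len l.length l le_rfl

-- zipping a list with the chr'd range IS enumerate-then-map
lemma zip_range_eq_enumerate (xs : List String) :
    ∀ s : Int, xs.zip ((PySem.List.pyRange s (s + (xs.length : Int)) 1).map pvChr)
      = (PySem.List.enumerate xs s).map (fun p => (p.2, pvChr p.1)) := by
  induction xs with
  | nil => intro s; simp [PySem.List.pyRange_one_eq_nil, PySem.List.enumerate_nil]
  | cons x xs ih =>
      intro s
      have h2 : s + (((x :: xs).length : Nat) : Int) = (s + 1) + (xs.length : Int) := by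
        simp only [List.length_cons]; push_cast; ring
      rw [PySem.List.pyRange_one_cons (by simp only [List.length_cons]; push_cast; omega), h2]
      simp only [List.map_cons, List.zip_cons_cons, PySem.List.enumerate_cons, List.map_cons]
      rw [ih (s + 1)]

-- A's loop in closed form
lemma loop_items (xs : List String) :
    ∀ (d : PySem.Dict String String) (c : Int),
      ((xs.foldl
        (fun (st : PySem.Dict String String × Int) i =>
          if st.1.contains i then st
          else (st.1.insert i (pvChr st.2), st.2 + 1))
        (d, c)).1).items
      = d.items ++ (PySem.List.enumerate
            (PySem.List.dedup (xs.filter (fun x => !d.contains x))) c).map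
          (fun p => (p.2, pvChr p.1)) := by
  induction xs with
  | nil => intro d c; simp [PySem.List.enumerate_nil]
  | cons x xs ih =>
      intro d c
      by_cases hx : d.contains x = true
      · simp only [List.foldl_cons, if_true, List.filter_cons, hx, Bool.not_true]
        exact ih d c
      · have hx' : d.contains x = false := by simpa using hx
        simp only [List.foldl_cons, List.filter_cons, hx', Bool.not_false, if_true,
          Bool.false_eq_true, if_false]
        rw [ih (d.insert x (pvChr c)) (c + 1)]
        have hfilt : xs.filter (fun y => !(d.insert x (pvChr c)).contains y)
            = (xs.filter (fun y => !d.contains y)).filter (fun y => !(y == x)) := by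
          rw [List.filter_filter]
          apply List.filter_congr
          intro y _
          simp [PySem.Dict.contains_insert]
        rw [hfilt, PySem.Dict.items_insert_of_not_contains d (pvChr c) hx', dedup_cons,
          PySem.List.enumerate_cons]
        simp

theorem animal_codex_spec : Claim_equal_animal_codex := by
  intro xs _
  show animal_codex xs = animal_codex_alt xs
  unfold animal_codex animal_codex_alt
  rw [loop_items]
  have hf : xs.filter (fun x => !(PySem.Dict.empty : PySem.Dict String String).contains x) = xs := by
    simp [PySem.Dict.contains_empty]
  rw [hf]
  have hsorted : PySem.List.sorted (PySem.Set.ofList xs) (fun a => pvIdx xs a) false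
      = PySem.Set.ofList xs :=
    PySem.List.sorted_eq_of_perm_of_pairwise_lt _ _ (fun a => pvIdx xs a)
      (List.Perm.refl _) (pairwise_pvIdx xs)
  simp only [hsorted, PySem.List.dedup_eq_ofList]
  rw [show (PySem.Dict.empty : PySem.Dict String String).items = [] from rfl, List.nil_append,
    zip_range_eq_enumerate (PySem.Set.ofList xs) 97]
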